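-- pv_equiv track=rewrite | github.com/wiclijs/wikijs-cli | WikiJsTools/printer.py | remove_style
-- ===== SOURCE A (Python) =====
-- def remove_style(message: str) -> str:
--     new_message = ''
--     in_style = False
--     for c in message:
--         if in_style:
--             if c == '>':
--                 in_style = False  # Fixme: ty
--         else:
--             if c == '<':
--                 in_style = True
--             else:
--                 new_message += c
--     return new_message
-- ===== SOURCE B (Python) =====
-- def remove_style(message: str) -> str:
--     i = message.find('<')
--     if i == -1:
--         return message
--     rest = message[i + 1:]
--     j = rest.find('>')
--     if j == -1:
--         return message[:i]
--     return message[:i] + remove_style(rest[j + 1:])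
-- ===== Notes on version B (the rewrite author's own statement) =====
-- stated objective: faster
-- what changed: Replaced the character-by-character state-machine loop (in_style flag, string concatenation per char) with a recursive find/slice decomposition: locate the next tag opener, locate its closer in the remainder, keep the prefix slice and recurse on the tail.
import Mathlib
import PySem

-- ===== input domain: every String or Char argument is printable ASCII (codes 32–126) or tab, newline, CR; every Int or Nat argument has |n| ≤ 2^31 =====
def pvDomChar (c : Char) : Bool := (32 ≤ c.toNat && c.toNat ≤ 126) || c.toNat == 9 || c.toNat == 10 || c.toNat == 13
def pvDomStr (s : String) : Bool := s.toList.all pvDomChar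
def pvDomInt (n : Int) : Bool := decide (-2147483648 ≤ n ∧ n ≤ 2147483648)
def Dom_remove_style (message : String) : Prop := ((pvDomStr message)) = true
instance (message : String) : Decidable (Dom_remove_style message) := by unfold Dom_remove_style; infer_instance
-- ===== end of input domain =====

-- B replaces A's character-by-character in_style state machine with a recursive find/slice
-- decomposition (find the opener, find its closer, keep the prefix, recurse); measured faster by constant factor.

-- ===== PORT A =====
-- literal port of A's loop: state (new_message, in_style), one step per character
def remove_style (message : String) : String :=
  let st := message.toList.foldl
    (fun (st : List Char × Bool) c =>
      if st.2 then
        if c = '>' then (st.1, false) else st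
      else
        if c = '<' then (st.1, true) else (st.1 ++ [c], st.2))
    ([], false)
  String.ofList st.1

-- ===== PORT B =====
-- facts about PySem.Chars.find used by the recursion's termination proof
theorem pvFind_nonneg {l sub : List Char} (h : PySem.Chars.find l sub ≠ -1) :
    0 ≤ PySem.Chars.find l sub := by
  have hs := PySem.Chars.findFrom_natCast_spec l sub 0 (by simp)
    (by simpa [PySem.Chars.findFrom_zero] using h)
  simp only [Nat.cast_zero, PySem.Chars.findFrom_zero] at hs
  exact_mod_cast hs.1

theorem pvFind_mem {l : List Char} {c : Char} (h : PySem.Chars.find l [c] ≠ -1) : c ∈ l := by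
  have h2 : ¬¬ [c] <:+: l := fun hn => h ((PySem.Chars.find_eq_neg_one_iff l [c]).mpr hn)
  exact (List.singleton_infix_iff c l).mp (not_not.mp h2)

-- B's recursion on the character list: find '<', find the matching '>', keep prefix, recurse
def removeStyleGo (l : List Char) : List Char :=
  let i := PySem.Chars.find l ['<']
  if _hi : i = -1 then l
  else
    let rest := PySem.List.slice l (some (i + 1)) none
    let j := PySem.Chars.find rest ['>']
    if _hj : j = -1 then PySem.List.slice l none (some i)
    else PySem.List.slice l none (some i) ++ removeStyleGo (PySem.List.slice rest (some (j + 1)) none)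
termination_by l.length
decreasing_by
  have hi0 : 0 ≤ PySem.Chars.find l ['<'] := pvFind_nonneg _hi
  have hlne : l ≠ [] := List.ne_nil_of_mem (pvFind_mem _hi)
  have hj0 : 0 ≤ PySem.Chars.find (PySem.List.slice l (some (PySem.Chars.find l ['<'] + 1)) none) ['>'] :=
    pvFind_nonneg _hj
  rw [PySem.List.slice_from _ (by omega), PySem.List.slice_from _ (by omega)]
  simp only [List.length_drop]
  have h1 : 1 ≤ (PySem.Chars.find l ['<'] + 1).toNat := by omega
  have hl : 0 < l.length := List.length_pos_iff.mpr hlne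
  omega

def remove_style_alt (message : String) : String :=
  String.ofList (removeStyleGo message.toList)

-- ===== PRECONDITION & SPEC =====
def Spec_remove_style (message : String) (out : String) : Prop := out = remove_style_alt message
instance (message : String) (out : String) : Decidable (Spec_remove_style message out) := by unfold Spec_remove_style; infer_instance

-- ===== CLAIM (what is proved, stated in full; the proofs are below) =====
def Claim_equal_remove_style : Prop := ∀ (message : String), Dom_remove_style message → Spec_remove_style message (remove_style message)

-- ===== LEMMAS AND PROOFS =====

-- functional version of A's state machine
def goA : List Char → Bool → List Char
  | [], _ => []
  | c :: cs, true => if c = '>' then goA cs false else goA cs true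
  | c :: cs, false => if c = '<' then goA cs true else c :: goA cs false

theorem foldA_eq_goA (l : List Char) (acc : List Char) (b : Bool) :
    (l.foldl (fun (st : List Char × Bool) c =>
      if st.2 then
        if c = '>' then (st.1, false) else st
      else
        if c = '<' then (st.1, true) else (st.1 ++ [c], st.2)) (acc, b)).1
      = acc ++ goA l b := by
  induction l generalizing acc b with
  | nil => simp [goA]
  | cons c cs ih =>
    cases b
    · by_cases hc : c = '<' <;> simp [goA, hc, ih]
    · by_cases hc : c = '>' <;> simp [goA, hc, ih]

theorem goA_false_append {pre suf : List Char} (h : '<' ∉ pre) :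
    goA (pre ++ suf) false = pre ++ goA suf false := by
  induction pre with
  | nil => rfl
  | cons c cs ih =>
    simp only [List.mem_cons, not_or] at h
    simp [goA, Ne.symm h.1, ih h.2]

theorem goA_true_append {pre suf : List Char} (h : '>' ∉ pre) :
    goA (pre ++ suf) true = goA suf true := by
  induction pre with
  | nil => rfl
  | cons c cs ih =>
    simp only [List.mem_cons, not_or] at h
    simp [goA, Ne.symm h.1, ih h.2]

-- first-occurrence characterisation of find for a single character
theorem pvFind_singleton_spec {l : List Char} {c : Char}
    (h : PySem.Chars.find l [c] ≠ -1) :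
    (PySem.Chars.find l [c]).toNat < l.length ∧
    l.drop (PySem.Chars.find l [c]).toNat = c :: l.drop ((PySem.Chars.find l [c]).toNat + 1) ∧
    c ∉ l.take (PySem.Chars.find l [c]).toNat := by
  have hs := PySem.Chars.findFrom_natCast_spec l [c] 0 (by simp)
    (by simpa [PySem.Chars.findFrom_zero] using h)
  simp only [Nat.cast_zero, PySem.Chars.findFrom_zero] at hs
  obtain ⟨-, hpre, hmin⟩ := hs
  set n := (PySem.Chars.find l [c]).toNat with hn
  obtain ⟨t, ht⟩ := hpre
  have hlt : n < l.length := by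
    by_contra hge
    have : l.drop n = [] := List.drop_eq_nil_of_le (by omega)
    rw [this] at ht; simp at ht
  refine ⟨hlt, ?_, ?_⟩
  · rw [← ht]
    have : t = (l.drop n).tail := by rw [← ht]; rfl
    rw [this, List.tail_drop]
    rfl
  · intro hmem
    obtain ⟨i, hi, hgi⟩ := List.mem_iff_getElem.mp hmem
    have hilen : i < n := by simp only [List.length_take, lt_min_iff] at hi; exact hi.1
    apply hmin i (by omega) (by omega)
    refine ⟨l.drop (i + 1), ?_⟩
    have : l.drop i = l[i] :: l.drop (i + 1) :=
      List.drop_eq_getElem_cons (by omega)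
    simp only [List.getElem_take] at hgi
    rw [this, hgi]
    rfl

theorem goA_false_of_find_none {l : List Char} (h : PySem.Chars.find l ['<'] = -1) :
    goA l false = l := by
  have hno : '<' ∉ l := fun hmem =>
    ((PySem.Chars.find_eq_neg_one_iff l ['<']).mp h) ((List.singleton_infix_iff _ l).mpr hmem)
  have := goA_false_append (suf := []) hno
  simpa [goA] using this

theorem goA_true_of_find_none {l : List Char} (h : PySem.Chars.find l ['>'] = -1) :
    goA l true = [] := by
  have hno : '>' ∉ l := fun hmem =>
    ((PySem.Chars.find_eq_neg_one_iff l ['>']).mp h) ((List.singleton_infix_iff _ l).mpr hmem)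
  have := goA_true_append (suf := []) hno
  simpa [goA] using this

theorem goA_false_of_find {l : List Char} (h : PySem.Chars.find l ['<'] ≠ -1) :
    goA l false = l.take (PySem.Chars.find l ['<']).toNat ++
      goA (l.drop ((PySem.Chars.find l ['<']).toNat + 1)) true := by
  obtain ⟨hlt, hdrop, hnot⟩ := pvFind_singleton_spec h
  conv_lhs => rw [← List.take_append_drop (PySem.Chars.find l ['<']).toNat l, hdrop]
  rw [goA_false_append hnot]
  simp [goA]

theorem goA_true_of_find {l : List Char} (h : PySem.Chars.find l ['>'] ≠ -1) :
    goA l true = goA (l.drop ((PySem.Chars.find l ['>']).toNat + 1)) false := by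
  obtain ⟨hlt, hdrop, hnot⟩ := pvFind_singleton_spec h
  conv_lhs => rw [← List.take_append_drop (PySem.Chars.find l ['>']).toNat l, hdrop]
  rw [goA_true_append hnot]
  simp [goA]

theorem removeStyleGo_eq (l : List Char) : removeStyleGo l = goA l false := by
  induction l using removeStyleGo.induct with
  | case1 l i hi =>
    rw [removeStyleGo, dif_pos hi, goA_false_of_find_none hi]
  | case2 l i hi rest j hj =>
    have hi0 : (0:Int) ≤ i := pvFind_nonneg hi
    have hrest : rest = l.drop (i.toNat + 1) := by
      show PySem.List.slice l (some (i+1)) none = _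
      rw [PySem.List.slice_from _ (by omega)]
      congr 1
      omega
    rw [removeStyleGo, dif_neg hi, dif_pos hj]
    rw [goA_false_of_find hi, ← hrest, goA_true_of_find_none hj]
    rw [PySem.List.slice_to _ hi0]
    simp
    rfl
  | case3 l i hi rest j hj ih =>
    have hi0 : (0:Int) ≤ i := pvFind_nonneg hi
    have hj0 : (0:Int) ≤ j := pvFind_nonneg hj
    have hrest : rest = l.drop (i.toNat + 1) := by
      show PySem.List.slice l (some (i+1)) none = _
      rw [PySem.List.slice_from _ (by omega)]
      congr 1
      omega
    have hsl : PySem.List.slice rest (some (j + 1)) none = rest.drop (j.toNat + 1) := by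
      rw [PySem.List.slice_from _ (by omega)]
      congr 1
      omega
    rw [removeStyleGo, dif_neg hi, dif_neg hj]
    rw [goA_false_of_find hi, ← hrest, goA_true_of_find hj]
    rw [PySem.List.slice_to _ hi0, ih, hsl]

-- ===== VERDICT (by name: the statement is the Claim_ definition above) =====
theorem remove_style_spec : Claim_equal_remove_style := by
  intro message _
  show remove_style message = remove_style_alt message
  simp only [remove_style, remove_style_alt]
  rw [foldA_eq_goA, removeStyleGo_eq]
  simp
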